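-- pv_equiv track=rewrite | github.com/ReginaNasyrova/RussianGEC_SeqTagger | scripts/lcs.py | extract_pivot_alignment
-- ===== SOURCE A (Python) =====
-- def extract_pivot_alignment(alignment):
--     pivot_alignment = [0]
--     while pivot_alignment[-1]+1 < len(alignment):
--         pivot_pos = pivot_alignment[-1]
--         while pivot_pos+1 < len(alignment):
--             r, s = alignment[pivot_pos]
--             if alignment[pivot_pos+1] == (r+1, s+1):
--                 break
--             pivot_pos += 1
--         if pivot_pos > pivot_alignment[-1]:
--             pivot_alignment.append(pivot_pos)
--         if pivot_pos+1 < len(alignment):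
--             pivot_alignment.append(pivot_pos+1)
--     return [alignment[i] for i in pivot_alignment]
-- ===== SOURCE B (Python) =====
-- def extract_pivot_alignment(alignment):
--     n = len(alignment)
--
--     def diag(i):
--         r, s = alignment[i]
--         return alignment[i + 1] == (r + 1, s + 1)
--
--     return [alignment[i] for i in range(n)
--             if i == 0 or i == n - 1
--             or (i >= 1 and diag(i - 1))
--             or (i + 1 < n and diag(i))]
-- ===== Notes on version B (the rewrite author's own statement) =====
-- stated objective: simpler
-- what changed: Replaces the stateful resuming nested while-scan (which appends break positions as it goes) by a single stateless filter: index i is a pivot iff i is first, last, or adjacent to a diagonal step alignment[i+1]==alignment[i]+(1,1).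
import Mathlib
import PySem

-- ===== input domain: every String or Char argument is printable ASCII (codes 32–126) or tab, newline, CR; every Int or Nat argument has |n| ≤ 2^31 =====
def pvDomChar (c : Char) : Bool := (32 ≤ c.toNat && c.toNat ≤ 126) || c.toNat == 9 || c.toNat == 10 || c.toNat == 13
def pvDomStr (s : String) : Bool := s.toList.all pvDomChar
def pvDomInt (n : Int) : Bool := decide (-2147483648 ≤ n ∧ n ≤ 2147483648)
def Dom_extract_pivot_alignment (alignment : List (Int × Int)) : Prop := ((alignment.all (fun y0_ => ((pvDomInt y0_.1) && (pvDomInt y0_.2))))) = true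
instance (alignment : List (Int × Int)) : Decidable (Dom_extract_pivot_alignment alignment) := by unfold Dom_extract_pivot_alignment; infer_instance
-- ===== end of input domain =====

-- B replaces A's stateful resuming nested while-scan with one stateless filter over indices; objective: simpler.

-- ===== PORT A =====
-- alignment[i] for an index that is in range whenever used (all uses below are guarded by bounds checks): exact.
def pairAt (xs : List (Int × Int)) (i : Nat) : Int × Int := xs.getD i (0, 0)

-- `alignment[pivot_pos+1] == (r+1, s+1)` where `r, s = alignment[pivot_pos]`
def diagAt (xs : List (Int × Int)) (p : Nat) : Bool :=
  pairAt xs (p + 1) = ((pairAt xs p).1 + 1, (pairAt xs p).2 + 1)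

-- inner `while pivot_pos+1 < len(alignment)` loop of A, returning the final pivot_pos
def innerA (xs : List (Int × Int)) (p : Nat) : Nat :=
  if p + 1 < xs.length then
    if diagAt xs p then p else innerA xs (p + 1)
  else p
termination_by xs.length - p

theorem innerA_ge (xs : List (Int × Int)) (p : Nat) : p ≤ innerA xs p := by
  fun_induction innerA xs p with
  | case1 => exact le_refl _
  | case2 p _ _ ih => exact Nat.le_trans (Nat.le_succ p) ih
  | case3 => exact le_refl _

-- outer while loop of A; `acc` is pivot_alignment (nonempty, last element = `last`), kept as
-- the list plus its last element to express `pivot_alignment[-1]` structurally.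
def outerA (xs : List (Int × Int)) (last : Nat) (acc : List Nat) : List Nat :=
  if _h : last + 1 < xs.length then
    let p := innerA xs last
    let acc' := if last < p then acc ++ [p] else acc
    if p + 1 < xs.length then outerA xs (p + 1) (acc' ++ [p + 1]) else acc'
  else acc
termination_by xs.length - last
decreasing_by have := innerA_ge xs last; omega

def extract_pivot_alignment (alignment : List (Int × Int)) : List (Int × Int) :=
  (outerA alignment 0 [0]).map (pairAt alignment)

-- ===== PORT B =====
def predB (xs : List (Int × Int)) (i : Nat) : Bool :=
  i == 0 || i == xs.length - 1 || (decide (1 ≤ i) && diagAt xs (i - 1)) ||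
    (decide (i + 1 < xs.length) && diagAt xs i)

def extract_pivot_alignment_alt (alignment : List (Int × Int)) : List (Int × Int) :=
  ((List.range alignment.length).filter (predB alignment)).map (pairAt alignment)

-- ===== PRECONDITION & SPEC =====
-- A indexes alignment[0] unconditionally, so it raises IndexError on the empty list.
def Pre_extract_pivot_alignment (alignment : List (Int × Int)) : Prop := alignment ≠ []
instance (alignment : List (Int × Int)) : Decidable (Pre_extract_pivot_alignment alignment) := by
  unfold Pre_extract_pivot_alignment; infer_instance

def pvWitness_extract_pivot_alignment : (List (Int × Int)) := [(0, 0), (1, 1), (5, 2)]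

def Spec_extract_pivot_alignment (alignment : List (Int × Int)) (out : List (Int × Int)) : Prop := out = extract_pivot_alignment_alt alignment
instance (alignment : List (Int × Int)) (out : List (Int × Int)) : Decidable (Spec_extract_pivot_alignment alignment out) := by unfold Spec_extract_pivot_alignment; infer_instance

-- ===== CLAIM (what is proved, stated in full; the proofs are below) =====
def Claim_equal_extract_pivot_alignment : Prop := ∀ (alignment : List (Int × Int)), Dom_extract_pivot_alignment alignment → Pre_extract_pivot_alignment alignment → Spec_extract_pivot_alignment alignment (extract_pivot_alignment alignment)


-- ===== LEMMAS AND PROOFS =====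

-- filtered index list from position a on
def F (xs : List (Int × Int)) (a : Nat) : List Nat :=
  (List.range' a (xs.length - a)).filter (predB xs)

theorem innerA_lt (xs : List (Int × Int)) (p : Nat) (hp : p < xs.length) :
    innerA xs p < xs.length := by
  fun_induction innerA xs p with
  | case1 => omega
  | case2 p h _ ih => exact ih (by omega)
  | case3 => omega

theorem innerA_no_diag (xs : List (Int × Int)) (p : Nat) :
    ∀ i, p ≤ i → i < innerA xs p → diagAt xs i = false := by
  fun_induction innerA xs p with
  | case1 p h hd => intro i h1 h2; omega
  | case2 p h hd ih =>
    intro i h1 h2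
    rcases Nat.eq_or_lt_of_le h1 with rfl | h1'
    · simpa using hd
    · exact ih i h1' h2
  | case3 p h => intro i h1 h2; omega

theorem innerA_break (xs : List (Int × Int)) (p : Nat)
    (h : innerA xs p + 1 < xs.length) : diagAt xs (innerA xs p) = true := by
  fun_induction innerA xs p with
  | case1 p _ hd => simpa using hd
  | case2 p _ _ ih => exact ih h
  | case3 p hnot => omega

theorem F_skip (xs : List (Int × Int)) (a b : Nat) (hab : a ≤ b) (hb : b ≤ xs.length)
    (h : ∀ i, a ≤ i → i < b → predB xs i = false) : F xs a = F xs b := by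
  unfold F
  have hsplit : List.range' a (xs.length - a) =
      List.range' a (b - a) ++ List.range' b (xs.length - b) := by
    rw [show xs.length - a = (b - a) + (xs.length - b) by omega, ← List.range'_append]
    rw [show a + 1 * (b - a) = b by omega]
  rw [hsplit, List.filter_append]
  have hnil : (List.range' a (b - a)).filter (predB xs) = [] := by
    apply List.filter_eq_nil_iff.mpr
    intro i hi
    rw [List.mem_range'] at hi
    obtain ⟨k, hk, rfl⟩ := hi
    simp only [Bool.not_eq_true]
    exact h _ (by omega) (by omega)
  rw [hnil, List.nil_append]

theorem F_cons (xs : List (Int × Int)) (a : Nat) (ha : a < xs.length)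
    (hp : predB xs a = true) : F xs a = a :: F xs (a + 1) := by
  unfold F
  rw [show xs.length - a = (xs.length - (a + 1)) + 1 by omega]
  rw [List.range'_succ, List.filter_cons_of_pos hp]

theorem F_end (xs : List (Int × Int)) : F xs xs.length = [] := by
  unfold F; simp

-- predB is false strictly between two pivot indices: 1 ≤ i < xs.length - 1, no diagonal at i-1 or i
theorem predB_false (xs : List (Int × Int)) (i : Nat) (h1 : 1 ≤ i)
    (h2 : i + 1 < xs.length) (hd1 : diagAt xs (i - 1) = false)
    (hd2 : diagAt xs i = false) : predB xs i = false := by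
  unfold predB
  simp only [Bool.or_eq_false_iff, Bool.and_eq_false_iff]
  refine ⟨⟨⟨by simpa using (by omega : i ≠ 0), by simpa using (by omega : i ≠ xs.length - 1)⟩, ?_⟩, ?_⟩
  · right; exact hd1
  · right; exact hd2

theorem innerA_end (xs : List (Int × Int)) (p : Nat) (hp : p < xs.length)
    (h : ¬ innerA xs p + 1 < xs.length) : innerA xs p = xs.length - 1 := by
  have := innerA_lt xs p hp
  omega

theorem predB_after_diag (xs : List (Int × Int)) (p : Nat) (hd : diagAt xs p = true) :
    predB xs (p + 1) = true := by
  unfold predB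
  simp [hd]

theorem predB_of_diag (xs : List (Int × Int)) (p : Nat) (h2 : p + 1 < xs.length)
    (hd : diagAt xs p = true) : predB xs p = true := by
  unfold predB
  simp [hd, h2]

theorem predB_last (xs : List (Int × Int)) : predB xs (xs.length - 1) = true := by
  unfold predB
  simp

theorem outerA_spec (xs : List (Int × Int)) :
    ∀ (k last : Nat), xs.length - last ≤ k → last < xs.length →
      ∀ acc, outerA xs last acc = acc ++ F xs (last + 1) := by
  intro k
  induction k with
  | zero => intro last hk hl acc; omega
  | succ k ih =>
    intro last hk hl acc
    rw [outerA]
    by_cases h1 : last + 1 < xs.length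
    · simp only [dif_pos h1]
      have hge : last ≤ innerA xs last := innerA_ge xs last
      have hlt : innerA xs last < xs.length := innerA_lt xs last hl
      have hnd : ∀ i, last ≤ i → i < innerA xs last → diagAt xs i = false :=
        innerA_no_diag xs last
      have hskip : last < innerA xs last → F xs (last + 1) = F xs (innerA xs last) := by
        intro hgt
        refine F_skip xs (last + 1) (innerA xs last) (by omega) (by omega) ?_
        intro i hi1 hi2
        exact predB_false xs i (by omega) (by omega)
          (hnd (i - 1) (by omega) (by omega)) (hnd i (by omega) hi2)
      by_cases h2 : innerA xs last + 1 < xs.length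
      · have hdiag : diagAt xs (innerA xs last) = true := innerA_break xs last h2
        simp only [if_pos h2]
        rw [ih (innerA xs last + 1) (by omega) (by omega)]
        by_cases h3 : last < innerA xs last
        · rw [hskip h3, F_cons xs (innerA xs last) hlt (predB_of_diag xs _ h2 hdiag),
            F_cons xs (innerA xs last + 1) (by omega) (predB_after_diag xs _ hdiag)]
          simp [if_pos h3]
        · have hple : innerA xs last = last := by omega
          have hd' : diagAt xs last = true := hple ▸ hdiag
          rw [hple, F_cons xs (last + 1) (by omega) (predB_after_diag xs last hd')]
          simp
      · have hpe : innerA xs last = xs.length - 1 := innerA_end xs last hl h2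
        have h3 : last < innerA xs last := by omega
        simp only [if_neg h2, if_pos h3]
        rw [hskip h3, F_cons xs (innerA xs last) hlt (by rw [hpe]; exact predB_last xs)]
        rw [show innerA xs last + 1 = xs.length by omega, F_end]
    · simp only [dif_neg h1]
      have : last + 1 = xs.length := by omega
      rw [this, F_end, List.append_nil]

-- ===== VERDICT (by name: the statement is the Claim_ definition above) =====
theorem extract_pivot_alignment_spec : Claim_equal_extract_pivot_alignment := by
  intro xs _ hpre
  have hn : 0 < xs.length := List.length_pos_iff.mpr hpre
  unfold Spec_extract_pivot_alignment extract_pivot_alignment extract_pivot_alignment_alt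
  rw [outerA_spec xs xs.length 0 (by omega) hn]
  have hr : (List.range xs.length).filter (predB xs) = F xs 0 := by
    unfold F
    rw [List.range_eq_range']
    simp
  rw [hr, F_cons xs 0 hn (by unfold predB; simp)]
  simp
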